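-- pv_equiv track=rewrite | github.com/pkr465/care | agents/adapters/ast_complexity_adapter.py | _compute_max_nesting
-- ===== SOURCE A (Python) =====
-- def _compute_max_nesting(body: str) -> int:
--     """Estimate max nesting depth from brace counts in function body."""
--     max_depth = 0
--     depth = 0
--     in_string = False
--     in_line_comment = False
--     in_block_comment = False
--     i = 0
--     while i < len(body):
--         c = body[i]
--         if in_line_comment:
--             if c == '\n':
--                 in_line_comment = False
--         elif in_block_comment:
--             if c == '*' and i + 1 < len(body) and body[i + 1] == '/':
--                 in_block_comment = False
--                 i += 1
--         elif in_string:
--             if c == '\\':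
--                 i += 1
--             elif c == '"':
--                 in_string = False
--         else:
--             if c == '/' and i + 1 < len(body):
--                 nxt = body[i + 1]
--                 if nxt == '/':
--                     in_line_comment = True
--                 elif nxt == '*':
--                     in_block_comment = True
--             elif c == '"':
--                 in_string = True
--             elif c == '{':
--                 depth += 1
--                 max_depth = max(max_depth, depth)
--             elif c == '}':
--                 depth -= 1
--         i += 1
--     return max_depth
-- ===== SOURCE B (Python) =====
-- def _compute_max_nesting(body: str) -> int:
--     """Brace-depth scan that jumps over whole string and comment regions."""
--     n = len(body)
--     depth = 0
--     max_depth = 0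
--     i = 0
--     while i < n:
--         c = body[i]
--         if c == '{':
--             depth += 1
--             if depth > max_depth:
--                 max_depth = depth
--             i += 1
--         elif c == '}':
--             depth -= 1
--             i += 1
--         elif c == '"':
--             i += 1
--             while i < n:
--                 if body[i] == '\\':
--                     i += 2
--                 elif body[i] == '"':
--                     i += 1
--                     break
--                 else:
--                     i += 1
--         elif c == '/' and i + 1 < n:
--             nxt = body[i + 1]
--             if nxt == '/':
--                 j = body.find('\n', i + 2)
--                 i = n if j == -1 else j + 1
--             elif nxt == '*':
--                 j = body.find('*/', i + 1)
--                 i = n if j == -1 else j + 2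
--             else:
--                 i += 1
--         else:
--             i += 1
--     return max_depth
-- ===== Notes on version B (the rewrite author's own statement) =====
-- stated objective: alternative
-- what changed: B drops A's per-character four-flag state machine and instead does a brace-counting scan that, on meeting a quote or comment opener, jumps over the whole string/comment region at once (str.find for comments, a dedicated escape-aware skip for strings).
import Mathlib
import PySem

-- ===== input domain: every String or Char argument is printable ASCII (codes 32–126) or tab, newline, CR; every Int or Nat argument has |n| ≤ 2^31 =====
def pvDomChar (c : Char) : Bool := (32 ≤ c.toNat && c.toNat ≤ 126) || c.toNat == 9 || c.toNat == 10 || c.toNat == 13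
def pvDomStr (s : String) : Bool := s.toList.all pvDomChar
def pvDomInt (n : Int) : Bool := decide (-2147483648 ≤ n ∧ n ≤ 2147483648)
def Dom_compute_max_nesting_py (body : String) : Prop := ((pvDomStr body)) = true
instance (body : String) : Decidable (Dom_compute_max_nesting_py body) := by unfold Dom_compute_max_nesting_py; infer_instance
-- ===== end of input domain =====

-- B replaces A's per-character four-flag state machine with a brace scan that jumps over
-- whole string/comment regions via dedicated skip helpers (objective: alternative).

-- ===== PORT A =====
-- A's index loop over body with flags in_string/in_line_comment/in_block_comment;
-- consuming the list head = i += 1, consuming two elements = the extra i += 1 branches.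
def goA : List Char → Bool → Bool → Bool → Int → Int → Int
  | [], _, _, _, _, maxd => maxd
  | c :: rest, inStr, inLine, inBlk, depth, maxd =>
    if inLine then
      goA rest inStr (if c = '\n' then false else inLine) inBlk depth maxd
    else if inBlk then
      if c = '*' ∧ rest.head? = some '/' then goA rest.tail inStr inLine false depth maxd
      else goA rest inStr inLine inBlk depth maxd
    else if inStr then
      if c = '\\' then goA rest.tail inStr inLine inBlk depth maxd
      else if c = '"' then goA rest false inLine inBlk depth maxd
      else goA rest inStr inLine inBlk depth maxd
    else
      if c = '/' ∧ rest ≠ [] then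
        if rest.head? = some '/' then goA rest inStr true inBlk depth maxd
        else if rest.head? = some '*' then goA rest inStr inLine true depth maxd
        else goA rest inStr inLine inBlk depth maxd
      else if c = '"' then goA rest true inLine inBlk depth maxd
      else if c = '{' then goA rest inStr inLine inBlk (depth + 1) (max maxd (depth + 1))
      else if c = '}' then goA rest inStr inLine inBlk (depth - 1) maxd
      else goA rest inStr inLine inBlk depth maxd
  termination_by cs _ _ _ _ _ => cs.length
  decreasing_by all_goals (simp only [List.length_cons, List.length_tail]; omega)

def compute_max_nesting_py (body : String) : Int :=
  goA body.toList false false false 0 0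

-- ===== PORT B =====
-- skip past the closing '"' of a string (backslash skips the next char)
def skipStr : List Char → List Char
  | [] => []
  | c :: t =>
    if c = '\\' then skipStr t.tail
    else if c = '"' then t
    else skipStr t
  termination_by l => l.length
  decreasing_by all_goals (simp only [List.length_cons, List.length_tail]; omega)

-- skip past the terminating newline of a line comment
def skipLine : List Char → List Char
  | [] => []
  | c :: t => if c = '\n' then t else skipLine t

-- skip past the closing "*/" of a block comment
def skipBlock : List Char → List Char
  | [] => []
  | c :: t => if c = '*' ∧ t.head? = some '/' then t.tail else skipBlock t

theorem skipStr_length_le (l : List Char) : (skipStr l).length ≤ l.length := by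
  induction l using skipStr.induct <;> simp_all [skipStr, List.length_tail] <;> omega

theorem skipLine_length_le (l : List Char) : (skipLine l).length ≤ l.length := by
  induction l with
  | nil => simp [skipLine]
  | cons c t ih => simp only [skipLine]; split_ifs <;> simp <;> omega

theorem skipBlock_length_le (l : List Char) : (skipBlock l).length ≤ l.length := by
  induction l with
  | nil => simp [skipBlock]
  | cons c t ih =>
    simp only [skipBlock]; split_ifs
    · simp [List.length_tail]; omega
    · simp; omega

def goB : List Char → Int → Int → Int
  | [], _, maxd => maxd
  | c :: rest, depth, maxd =>
    if c = '{' then goB rest (depth + 1) (max maxd (depth + 1))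
    else if c = '}' then goB rest (depth - 1) maxd
    else if c = '"' then goB (skipStr rest) depth maxd
    else if c = '/' then
      if rest.head? = some '/' then goB (skipLine rest.tail) depth maxd
      else if rest.head? = some '*' then goB (skipBlock rest) depth maxd
      else goB rest depth maxd
    else goB rest depth maxd
  termination_by cs _ _ => cs.length
  decreasing_by all_goals
    (have h1 := skipStr_length_le rest
     have h2 := skipLine_length_le rest.tail
     have h3 := skipBlock_length_le rest
     have h4 : rest.tail.length = rest.length - 1 := by simp
     simp only [List.length_cons]
     omega)

def compute_max_nesting_py_alt (body : String) : Int :=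
  goB body.toList 0 0

-- ===== PRECONDITION & SPEC =====
def Spec_compute_max_nesting_py (body : String) (out : Int) : Prop := out = compute_max_nesting_py_alt body
instance (body : String) (out : Int) : Decidable (Spec_compute_max_nesting_py body out) := by unfold Spec_compute_max_nesting_py; infer_instance

-- ===== CLAIM (what is proved, stated in full; the proofs are below) =====
def Claim_equal_compute_max_nesting_py : Prop := ∀ (body : String), Dom_compute_max_nesting_py body → Spec_compute_max_nesting_py body (compute_max_nesting_py body)

-- ===== LEMMAS AND PROOFS =====
theorem goA_eq_goB (n : Nat) : ∀ (cs : List Char), cs.length ≤ n → ∀ (d m : Int),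
    goA cs false false false d m = goB cs d m ∧
    goA cs true false false d m = goB (skipStr cs) d m ∧
    goA cs false true false d m = goB (skipLine cs) d m ∧
    goA cs false false true d m = goB (skipBlock cs) d m := by
  induction n with
  | zero =>
    intro cs h d m
    have : cs = [] := List.eq_nil_of_length_eq_zero (Nat.le_zero.mp h)
    subst this
    simp [goA, goB, skipStr, skipLine, skipBlock]
  | succ n ih =>
    intro cs h d m
    match cs with
    | [] => simp [goA, goB, skipStr, skipLine, skipBlock]
    | c :: rest =>
      have hr : rest.length ≤ n := by simp only [List.length_cons] at h; omega
      have hrt : rest.tail.length ≤ n := by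
        have : rest.tail.length = rest.length - 1 := by simp
        omega
      have ih1 := fun (l : List Char) (hl : l.length ≤ n) (d m : Int) => (ih l hl d m).1
      have ih2 := fun (l : List Char) (hl : l.length ≤ n) (d m : Int) => (ih l hl d m).2.1
      have ih3 := fun (l : List Char) (hl : l.length ≤ n) (d m : Int) => (ih l hl d m).2.2.1
      have ih4 := fun (l : List Char) (hl : l.length ≤ n) (d m : Int) => (ih l hl d m).2.2.2
      refine ⟨?_, ?_, ?_, ?_⟩
      · -- code mode
        by_cases hsl : c = '/'
        · subst hsl
          match rest with
          | [] => simp [goA, goB]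
          | nxt :: r2 =>
            have hr2 : r2.length ≤ n := by simp only [List.length_cons] at hr; omega
            have hr2t : r2.tail.length ≤ n := by
              have : r2.tail.length = r2.length - 1 := by simp
              omega
            by_cases h1 : nxt = '/'
            · subst h1
              simp only [goA, goB, skipLine]
              simp [ih3 _ hr2]
            · by_cases h2 : nxt = '*'
              · subst h2
                simp only [goA, goB]
                by_cases hh : r2.head? = some '/'
                · simp [skipBlock, hh, ih1 _ hr2t]
                · simp [skipBlock, hh, ih4 _ hr2]
              · by_cases h3 : nxt = '"'
                · subst h3
                  simp only [goA, goB]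
                  simp [ih2 _ hr2]
                · by_cases h4 : nxt = '{'
                  · subst h4
                    simp only [goA, goB]
                    simp [ih1 _ hr2]
                  · by_cases h5 : nxt = '}'
                    · subst h5
                      simp only [goA, goB]
                      simp [ih1 _ hr2]
                    · simp only [goA, goB]
                      simp [h1, h2, h3, h4, h5, ih1 _ hr2]
        · by_cases hq : c = '"'
          · subst hq
            simp only [goA, goB]
            simp [ih2 _ hr]
          · by_cases ho : c = '{'
            · subst ho; simp only [goA, goB]; simp [ih1 _ hr]
            · by_cases hcl : c = '}'
              · subst hcl; simp only [goA, goB]; simp [ih1 _ hr]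
              · simp only [goA, goB]
                simp [hsl, hq, ho, hcl, ih1 _ hr]
      · -- string mode
        by_cases hb : c = '\\'
        · subst hb
          simp only [goA, goB, skipStr]
          simp [ih2 _ hrt]
        · by_cases hq : c = '"'
          · subst hq
            simp only [goA, goB, skipStr]
            simp [ih1 _ hr]
          · simp only [goA, skipStr]
            simp [hb, hq, ih2 _ hr]
      · -- line-comment mode
        by_cases hn : c = '\n'
        · subst hn
          simp only [goA, skipLine]
          simp [ih1 _ hr]
        · simp only [goA, skipLine]
          simp [hn, ih3 _ hr]
      · -- block-comment mode
        by_cases hcl : c = '*' ∧ rest.head? = some '/'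
        · obtain ⟨hc1, hc2⟩ := hcl
          subst hc1
          simp only [goA, skipBlock]
          simp [hc2, ih1 _ hrt]
        · simp only [goA, skipBlock]
          simp [hcl, ih4 _ hr]

theorem compute_max_nesting_py_spec : Claim_equal_compute_max_nesting_py := by
  intro body _
  unfold Spec_compute_max_nesting_py compute_max_nesting_py compute_max_nesting_py_alt
  exact (goA_eq_goB body.toList.length body.toList (le_refl _) 0 0).1
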